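-- pv_equiv track=rewrite | github.com/ZachOrr/m00se | commands/deps/helpers.py | parseleetargs
-- ===== SOURCE A (Python) =====
-- def parseleetargs(args):
-- 	'''Parse a list of strings, grouping (parenthetical captures).'''
-- 	# Whether we are in a (...) capture; note that these do not nest.
-- 	capturing = False
-- 	fields = []
-- 	for arg in args:
-- 		clean = arg.lstrip("(").rstrip(")")
-- 		if capturing:
-- 			# Capturing, so append arg to end of previous one.
-- 			fields[-1] += " " + clean
-- 			# Continue capturing if this arg doesn't end the capture.
-- 			capturing = not arg.endswith(")")
-- 		else:
-- 			# Not capturing, just append to list.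
-- 			fields.append(clean)
-- 			# Start capturing if arg begins a capture and doesn't end it.
-- 			capturing = arg.startswith("(") and not arg.endswith(")")
-- 	return fields
-- ===== SOURCE B (Python) =====
-- def parseleetargs(args):
-- 	'''Parse a list of strings, grouping (parenthetical captures).'''
-- 	# Stage 1: split args into capture segments (lists of tokens).
-- 	segments = []
-- 	i = 0
-- 	n = len(args)
-- 	while i < n:
-- 		head = args[i]
-- 		i += 1
-- 		if head.startswith("(") and not head.endswith(")"):
-- 			# an open capture runs up to (and including) the first later token
-- 			# ending with ")", or to the end of the input if none closes it
-- 			k = next((j for j in range(i, n) if args[j].endswith(")")), n - 1)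
-- 			segments.append([head] + args[i:k + 1])
-- 			i = k + 1
-- 		else:
-- 			segments.append([head])
-- 	# Stage 2: clean every token and join each segment with spaces.
-- 	return [" ".join(t.lstrip("(").rstrip(")") for t in seg) for seg in segments]
-- ===== Notes on version B (the rewrite author's own statement) =====
-- stated objective: alternative
-- what changed: Replaces A's single fold carrying a mutable `capturing` flag and growing the last field by string concatenation with a staged algorithm: stage 1 scans by index and splits the input into segments (an open-capture token plus the following tokens up to the first one ending with ')'), stage 2 builds each output field by cleaning a segment's tokens and joining them with ' '.join.
import Mathlib
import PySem

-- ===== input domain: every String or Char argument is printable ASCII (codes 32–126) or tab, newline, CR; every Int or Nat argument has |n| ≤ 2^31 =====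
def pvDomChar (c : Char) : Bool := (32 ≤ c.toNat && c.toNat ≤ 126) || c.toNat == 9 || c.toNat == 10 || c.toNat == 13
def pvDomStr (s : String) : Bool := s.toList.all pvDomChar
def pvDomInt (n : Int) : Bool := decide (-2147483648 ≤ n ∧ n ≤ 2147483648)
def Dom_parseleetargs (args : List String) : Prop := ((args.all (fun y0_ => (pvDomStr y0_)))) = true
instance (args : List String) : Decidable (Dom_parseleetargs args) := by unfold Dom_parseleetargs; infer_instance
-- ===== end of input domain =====

-- B replaces A's one-pass fold with a mutable `capturing` flag by a staged algorithm:
-- stage 1 splits the input into token segments by index, stage 2 cleans and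
-- space-joins each segment; same return value, objective: alternative decomposition.

-- arg.lstrip("(").rstrip(")")  — hand-ported, exact: strips all leading '(' and all
-- trailing ')' code points (single-char strip sets, ASCII).
def pvClean (arg : String) : String :=
  String.ofList (((arg.toList.dropWhile (· == '(')).reverse.dropWhile (· == ')')).reverse)

-- ===== PORT A =====
-- fields[-1] += s  (Python raises on empty fields; that state is unreachable in A)
def pvAddLast (fields : List String) (s : String) : List String :=
  fields.dropLast ++ [fields.getLastD "" ++ s]

def parseleetargsStep (st : Bool × List String) (arg : String) : Bool × List String :=
  let clean := pvClean arg
  if st.1 then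
    (!(PySem.Str.endswith arg ")"), pvAddLast st.2 (" " ++ clean))
  else
    (PySem.Str.startswith arg "(" && !(PySem.Str.endswith arg ")"), st.2 ++ [clean])

def parseleetargs (args : List String) : List String :=
  (args.foldl parseleetargsStep (false, [])).2

-- ===== PORT B =====
-- next((j for j in range(i, n) if args[j].endswith(")")), …): the first index ≥ j
-- whose token ends with ")", none if there is no such index
def pvFindCloseFrom (args : List String) (j : Nat) : Option Nat :=
  if _ : j < args.length then
    if PySem.Str.endswith (args.getD j "") ")" then some j else pvFindCloseFrom args (j + 1)
  else none
termination_by args.length - j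

theorem pvFindCloseFrom_some (args : List String) (j k : Nat)
    (h : pvFindCloseFrom args j = some k) : j ≤ k ∧ k < args.length := by
  fun_induction pvFindCloseFrom args j with
  | case1 j hj hcl => cases h; exact ⟨le_refl _, hj⟩
  | case2 j hj hcl ih => have := ih h; omega
  | case3 j hj => cases h

-- the slice bound k + 1 of Source B: k = next(…, n - 1), so k + 1 is the hit index + 1
-- and n otherwise (args[i:(n-1)+1] = args[i:n], exact also when the tail is empty)
def pvK1From (args : List String) (j : Nat) : Nat :=
  match pvFindCloseFrom args j with
  | some k => k + 1
  | none => args.length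

theorem pvK1From_lb (args : List String) (j : Nat) (hj : j ≤ args.length) :
    j ≤ pvK1From args j := by
  cases hf : pvFindCloseFrom args j with
  | some k =>
    have := pvFindCloseFrom_some args j k hf
    simp only [pvK1From, hf]
    omega
  | none => simp only [pvK1From, hf]; exact hj

-- stage 1: split args into capture segments (lists of tokens), scanning by index
def pvSegIdx (args : List String) (i : Nat) : List (List String) :=
  if h : i < args.length then
    let head := args.getD i ""
    if PySem.Str.startswith head "(" && !(PySem.Str.endswith head ")") then
      (head :: PySem.List.slice args (some ((i + 1 : Nat) : Int)) (some ((pvK1From args (i + 1) : Nat) : Int)))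
        :: pvSegIdx args (pvK1From args (i + 1))
    else [head] :: pvSegIdx args (i + 1)
  else []
termination_by args.length - i
decreasing_by
  · have := pvK1From_lb args (i + 1) (by omega)
    omega
  · omega

-- stage 2: clean every token and join each segment with spaces
def parseleetargs_alt (args : List String) : List String :=
  (pvSegIdx args 0).map (fun seg => PySem.Str.join " " (seg.map pvClean))

-- ===== PRECONDITION & SPEC =====
def Spec_parseleetargs (args : List String) (out : List String) : Prop := out = parseleetargs_alt args
instance (args : List String) (out : List String) : Decidable (Spec_parseleetargs args out) := by unfold Spec_parseleetargs; infer_instance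

-- ===== CLAIM (what is proved, stated in full; the proofs are below) =====
def Claim_equal_parseleetargs : Prop := ∀ (args : List String), Dom_parseleetargs args → Spec_parseleetargs args (parseleetargs args)

-- ===== LEMMAS AND PROOFS =====

-- list-level restatement of B's stage 1 (proof vehicle): index of the first closing
-- token of a suffix, the slice bound, the segments of a suffix
def pvFindClose : List String → Option Nat
  | [] => none
  | t :: r => if PySem.Str.endswith t ")" then some 0 else (pvFindClose r).map (· + 1)

def pvK1 (rest : List String) : Nat :=
  match pvFindClose rest with
  | some i => i + 1
  | none => rest.length

def pvSegments : List String → List (List String)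
  | [] => []
  | head :: rest =>
    if PySem.Str.startswith head "(" && !(PySem.Str.endswith head ")") then
      (head :: rest.take (pvK1 rest)) :: pvSegments (rest.drop (pvK1 rest))
    else
      [head] :: pvSegments rest
termination_by l => l.length
decreasing_by
  · simp only [List.length_cons, List.length_drop]; omega
  · simp

def pvAltSeg (args : List String) : List String :=
  (pvSegments args).map (fun seg => PySem.Str.join " " (seg.map pvClean))

theorem pvFindClose_some (l : List String) (m : Nat) (h : pvFindClose l = some m) :
    m < l.length := by
  induction l generalizing m with
  | nil => cases h
  | cons t r ih =>
    unfold pvFindClose at h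
    split at h
    · cases h; simp
    · cases hf : pvFindClose r with
      | none => rw [hf] at h; cases h
      | some m' =>
        rw [hf] at h
        cases h
        have := ih m' hf
        simp only [List.length_cons]
        omega

theorem pvK1_le (l : List String) : pvK1 l ≤ l.length := by
  cases hf : pvFindClose l with
  | some m =>
    have := pvFindClose_some l m hf
    simp only [pvK1, hf]
    omega
  | none => simp only [pvK1, hf]; exact le_refl _

-- B's index scan computes the list-level pvFindClose of the suffix
theorem pvFindCloseFrom_eq (args : List String) (j : Nat) :
    pvFindCloseFrom args j = (pvFindClose (args.drop j)).map (j + ·) := by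
  fun_induction pvFindCloseFrom args j with
  | case1 j hj hcl =>
    rw [List.drop_eq_getElem_cons hj]
    rw [List.getD_eq_getElem args "" hj] at hcl
    have hcl' : PySem.Chars.endswith args[j].toList [')'] = true := by simpa using hcl
    simp [pvFindClose, hcl']
  | case2 j hj hcl ih =>
    rw [List.drop_eq_getElem_cons hj]
    rw [List.getD_eq_getElem args "" hj] at hcl
    rw [ih]
    simp only [pvFindClose]
    rw [if_neg hcl]
    cases pvFindClose (args.drop (j + 1)) <;> simp
    omega
  | case3 j hj =>
    rw [List.drop_of_length_le (by omega)]
    simp [pvFindClose]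

theorem pvK1From_eq (args : List String) (j : Nat) (hj : j ≤ args.length) :
    pvK1From args j = j + pvK1 (args.drop j) := by
  unfold pvK1From pvK1
  rw [pvFindCloseFrom_eq]
  cases pvFindClose (args.drop j) with
  | some m => simp; omega
  | none => simp; omega

-- B's index scan produces exactly the segments of the suffix
theorem pvSegIdx_eq (args : List String) :
    ∀ (m i : Nat), args.length - i ≤ m → i ≤ args.length →
      pvSegIdx args i = pvSegments (args.drop i) := by
  intro m
  induction m with
  | zero =>
    intro i hm hi
    have hlen : i = args.length := by omega
    unfold pvSegIdx
    rw [dif_neg (by omega), List.drop_of_length_le (by omega)]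
    simp [pvSegments]
  | succ m ih =>
    intro i hm hi
    by_cases h : i < args.length
    · unfold pvSegIdx
      rw [dif_pos h]
      simp only [List.getD_eq_getElem args "" h]
      rw [List.drop_eq_getElem_cons h]
      by_cases hc : (PySem.Str.startswith args[i] "(" && !(PySem.Str.endswith args[i] ")")) = true
      · rw [if_pos hc]
        unfold pvSegments
        rw [if_pos hc]
        have hk1 : pvK1From args (i + 1) = (i + 1) + pvK1 (args.drop (i + 1)) :=
          pvK1From_eq args (i + 1) (by omega)
        have hkle : pvK1 (args.drop (i + 1)) ≤ args.length - (i + 1) := by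
          have := pvK1_le (args.drop (i + 1)); simpa using this
        have hud : (i + 1) + pvK1 (args.drop (i + 1)) ≤ args.length := by omega
        have hmm : args.length - ((i + 1) + pvK1 (args.drop (i + 1))) ≤ m := by omega
        have e1 : i + 1 + pvK1 (args.drop (i + 1)) - (i + 1) = pvK1 (args.drop (i + 1)) := by
          omega
        rw [hk1, PySem.List.slice_natCast, e1, List.drop_drop,
          ih ((i + 1) + pvK1 (args.drop (i + 1))) hmm hud]
      · rw [Bool.not_eq_true] at hc
        rw [if_neg (by simp only [hc]; exact Bool.false_ne_true)]
        unfold pvSegments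
        rw [if_neg (by simp only [hc]; exact Bool.false_ne_true), ih (i + 1) (by omega) (by omega)]
    · unfold pvSegIdx
      rw [dif_neg h, List.drop_of_length_le (by omega)]
      simp [pvSegments]

theorem pvAlt_eq (args : List String) : parseleetargs_alt args = pvAltSeg args := by
  unfold parseleetargs_alt pvAltSeg
  rw [pvSegIdx_eq args args.length 0 (by omega) (by omega)]
  simp

-- the tail of a joined segment: " " + clean(t1) + " " + clean(t2) + …
def pvTailJoin : List String → String
  | [] => ""
  | t :: r => " " ++ pvClean t ++ pvTailJoin r

theorem pvStrJoin_cons (sep a b : String) (l : List String) :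
    PySem.Str.join sep (a :: b :: l) = a ++ sep ++ PySem.Str.join sep (b :: l) := by
  simp [PySem.Str.join, PySem.Chars.join_cons_cons, String.append_assoc]

theorem pvJoinSeg (t : List String) (h : String) :
    PySem.Str.join " " ((h :: t).map pvClean) = pvClean h ++ pvTailJoin t := by
  induction t generalizing h with
  | nil => simp [PySem.Str.join, PySem.Chars.join_singleton, pvTailJoin]
  | cons a r ih =>
    rw [List.map_cons, List.map_cons, pvStrJoin_cons, pvTailJoin]
    rw [← List.map_cons, ih a]
    simp [String.append_assoc]

theorem pvK1_cons_close (t : String) (r : List String)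
    (h : PySem.Str.endswith t ")" = true) : pvK1 (t :: r) = 1 := by
  have h' : PySem.Chars.endswith t.toList [')'] = true := by simpa using h
  simp [pvK1, pvFindClose, h']

theorem pvK1_cons_open (t : String) (r : List String)
    (h : PySem.Str.endswith t ")" = false) : pvK1 (t :: r) = pvK1 r + 1 := by
  simp only [pvK1, pvFindClose, h, Bool.false_eq_true, if_false, List.length_cons]
  cases pvFindClose r <;> simp

-- pvAddLast on a nonempty list rewrites the last element
theorem pvAddLast_concat (acc : List String) (f s : String) :
    pvAddLast (acc ++ [f]) s = acc ++ [f ++ s] := by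
  simp [pvAddLast]

-- joint loop invariant: A's fold from capturing = false agrees with B's segment list,
-- and from capturing = true with the current segment's remaining tail plus the rest
theorem parseleetargs_loop (args : List String) :
    (∀ acc, (args.foldl parseleetargsStep (false, acc)).2 = acc ++ pvAltSeg args) ∧
    (∀ acc f, (args.foldl parseleetargsStep (true, acc ++ [f])).2 =
      acc ++ (f ++ pvTailJoin (args.take (pvK1 args))) ::
        pvAltSeg (args.drop (pvK1 args))) := by
  induction args with
  | nil =>
    constructor
    · intro acc; simp [pvAltSeg, pvSegments]
    · intro acc f; simp [pvAltSeg, pvSegments, pvK1, pvFindClose, pvTailJoin]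
  | cons arg rest ih =>
    constructor
    · intro acc
      simp only [List.foldl_cons, parseleetargsStep, if_neg (Bool.false_ne_true)]
      by_cases h : (PySem.Str.startswith arg "(" && !(PySem.Str.endswith arg ")")) = true
      · rw [h, ih.2 acc (pvClean arg)]
        have h2 := h
        rw [Bool.and_eq_true, Bool.not_eq_true'] at h2
        have hs : PySem.Chars.startswith arg.toList ['('] = true := by simpa using h2.1
        have he2 : PySem.Chars.endswith arg.toList [')'] = false := by simpa using h2.2
        simp [pvAltSeg, pvSegments, hs, he2]
        rw [← List.map_take, ← List.map_cons, pvJoinSeg]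
      · rw [Bool.not_eq_true] at h
        rw [h, ih.1 (acc ++ [pvClean arg])]
        simp only [pvAltSeg, pvSegments, h, Bool.false_eq_true, if_false,
          List.map_cons]
        simp [PySem.Str.join, PySem.Chars.join_singleton]
    · intro acc f
      simp only [List.foldl_cons, parseleetargsStep, pvAddLast_concat]
      by_cases he : PySem.Str.endswith arg ")" = true
      · simp only [he, Bool.not_true]
        rw [pvK1_cons_close arg rest he]
        simp only [List.take_succ_cons, List.take_zero, List.drop_succ_cons, List.drop_zero,
          pvTailJoin]
        simpa [String.append_assoc] using ih.1 (acc ++ [f ++ (" " ++ pvClean arg)])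
      · rw [Bool.not_eq_true] at he
        simp only [he, Bool.not_false]
        rw [pvK1_cons_open arg rest he]
        simp only [List.take_succ_cons, List.drop_succ_cons, pvTailJoin]
        simpa [String.append_assoc] using ih.2 acc (f ++ (" " ++ pvClean arg))

-- ===== VERDICT (by name: the statement is the Claim_ definition above) =====
theorem parseleetargs_spec : Claim_equal_parseleetargs := by
  intro args _
  unfold Spec_parseleetargs parseleetargs
  rw [pvAlt_eq]
  simpa using (parseleetargs_loop args).1 []
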